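-- pv_equiv track=rewrite | github.com/zafarshodmonov/leetcode | weekly_contest.py | help_B1
-- ===== SOURCE A (Python) =====
-- def help_B1(nums: list[int]) -> list[list[int]]:
--
--     rel = []
--     n = len(nums)
--
--     for i in range(n):
--
--         item = nums[i]
--
--         if not (rel == []):
--             kel = rel.copy()
--             for j in kel:
--                 h = j[:]
--                 h.append(item)
--                 rel.append(h)
--
--         rel.append([item])
--
--     return rel
-- ===== SOURCE B (Python) =====
-- def help_B1(nums: list[int]) -> list[list[int]]:
--     if not nums:
--         return []
--     last = nums[-1]
--     prev = help_B1(nums[:-1])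
--     return prev + [s + [last] for s in prev] + [[last]]
-- ===== Notes on version B (the rewrite author's own statement) =====
-- stated objective: simpler
-- what changed: Replaced the iterative loop that mutates and re-scans a growing result list with a peel-last-element recursion: prev = help_B1(nums[:-1]), result = prev + extensions of prev by the last element + the singleton.
import Mathlib
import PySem

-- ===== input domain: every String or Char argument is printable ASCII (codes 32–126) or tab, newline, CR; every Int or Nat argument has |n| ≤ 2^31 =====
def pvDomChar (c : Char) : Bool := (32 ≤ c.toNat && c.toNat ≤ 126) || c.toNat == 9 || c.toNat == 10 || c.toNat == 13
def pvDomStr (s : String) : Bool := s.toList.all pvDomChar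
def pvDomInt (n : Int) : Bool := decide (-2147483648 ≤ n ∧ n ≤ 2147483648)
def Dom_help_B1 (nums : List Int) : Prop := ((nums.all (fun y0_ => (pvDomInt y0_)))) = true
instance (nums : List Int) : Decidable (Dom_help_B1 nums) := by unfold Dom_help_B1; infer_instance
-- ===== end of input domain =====

-- ===== PORT A =====
-- B replaces A's mutating loop with a peel-last-element recursion (same order, same cost): objective 'simpler'.
-- A: for each item, extend every existing subsequence by item, then append the singleton.
def help_B1 (nums : List Int) : List (List Int) :=
  nums.foldl
    (fun rel item =>
      (if rel = [] then rel else rel ++ rel.map (fun j => j ++ [item])) ++ [[item]])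
    []

-- ===== PORT B =====
-- recursion on nums[:-1]: structural recursion over the reversed list
def help_B1_alt_go (l : List Int) : List (List Int) :=
  match l with
  | [] => []
  | last :: rest =>
    let prev := help_B1_alt_go rest
    prev ++ prev.map (fun s => s ++ [last]) ++ [[last]]

def help_B1_alt (nums : List Int) : List (List Int) :=
  help_B1_alt_go nums.reverse

-- ===== PRECONDITION & SPEC =====
def Spec_help_B1 (nums : List Int) (out : List (List Int)) : Prop := out = help_B1_alt nums
instance (nums : List Int) (out : List (List Int)) : Decidable (Spec_help_B1 nums out) := by unfold Spec_help_B1; infer_instance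

-- ===== CLAIM (what is proved, stated in full; the proofs are below) =====
def Claim_equal_help_B1 : Prop := ∀ (nums : List Int), Dom_help_B1 nums → Spec_help_B1 nums (help_B1 nums)

-- ===== LEMMAS AND PROOFS =====
theorem help_B1_eq_go_reverse (nums : List Int) :
    help_B1 nums = help_B1_alt_go nums.reverse := by
  induction nums using List.reverseRecOn with
  | nil => simp [help_B1, help_B1_alt_go]
  | append_singleton l x ih =>
    simp only [help_B1, List.foldl_append, List.foldl_cons, List.foldl_nil,
      List.reverse_append, List.reverse_cons, List.reverse_nil, List.nil_append,
      List.singleton_append, help_B1_alt_go]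
    rw [show (l.foldl (fun rel item =>
      (if rel = [] then rel else rel ++ rel.map (fun j => j ++ [item])) ++ [[item]]) [])
        = help_B1 l from rfl, ih]
    by_cases h : help_B1_alt_go l.reverse = []
    · simp [h]
    · simp [h]

-- ===== VERDICT (by name: the statement is the Claim_ definition above) =====
theorem help_B1_spec : Claim_equal_help_B1 := by
  intro nums _
  unfold Spec_help_B1 help_B1_alt
  exact help_B1_eq_go_reverse nums
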